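-- pv_equiv track=rewrite | github.com/Mithesh2004/ICD_A_2 | Q4.py | compute_swap_regret
-- ===== SOURCE A (Python) =====
-- from collections import defaultdict
--
-- def compute_swap_regret(selected_arms, cost_matrix):
--     arm_times = defaultdict(list)
--     for t, arm in enumerate(selected_arms):
--         arm_times[arm].append(t)
--
--     num_arms = len(cost_matrix[0])
--
--     # Find best swap for each arm
--     best_swaps = {}
--     for arm in arm_times:
--         min_cost = float('inf')
--         best_target = None
--         for target_arm in range(1, num_arms + 1):
--             total = sum(cost_matrix[t][target_arm - 1] for t in arm_times[arm])
--             if total < min_cost: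
--                 min_cost = total
--                 best_target = target_arm
--         best_swaps[arm] = (best_target, min_cost)
--
--     # Total cost using best swaps
--     swapped_total_cost = sum(cost for _, cost in best_swaps.values())
--     algorithm_total = sum(cost_matrix[t][arm - 1] for t, arm in enumerate(selected_arms))
--
--     return algorithm_total - swapped_total_cost
-- ===== SOURCE B (Python) =====
-- def compute_swap_regret(selected_arms, cost_matrix):
--     num_arms = len(cost_matrix[0])
--     acc = {}
--     algorithm_total = 0
--     for t, arm in enumerate(selected_arms):
--         row = cost_matrix[t]
--         vec = acc.get(arm)
--         if vec is None:
--             vec = [0] * num_arms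
--             acc[arm] = vec
--         for j in range(num_arms):
--             vec[j] += row[j]
--         algorithm_total += row[arm - 1]
--     swapped_total = 0
--     for vec in acc.values():
--         swapped_total += min(vec)
--     return algorithm_total - swapped_total
-- ===== Notes on version B (the rewrite author's own statement) =====
-- stated objective: alternative
-- what changed: Replaces A's group-times-per-arm-then-rescan-the-cost-matrix-per-target scheme by a single forward pass that accumulates a per-target running-sum vector for each seen arm (and the algorithm total), then takes the minimum of each vector; the per-arm best_swaps dict and the arm_times grouping lists disappear.
import Mathlib
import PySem

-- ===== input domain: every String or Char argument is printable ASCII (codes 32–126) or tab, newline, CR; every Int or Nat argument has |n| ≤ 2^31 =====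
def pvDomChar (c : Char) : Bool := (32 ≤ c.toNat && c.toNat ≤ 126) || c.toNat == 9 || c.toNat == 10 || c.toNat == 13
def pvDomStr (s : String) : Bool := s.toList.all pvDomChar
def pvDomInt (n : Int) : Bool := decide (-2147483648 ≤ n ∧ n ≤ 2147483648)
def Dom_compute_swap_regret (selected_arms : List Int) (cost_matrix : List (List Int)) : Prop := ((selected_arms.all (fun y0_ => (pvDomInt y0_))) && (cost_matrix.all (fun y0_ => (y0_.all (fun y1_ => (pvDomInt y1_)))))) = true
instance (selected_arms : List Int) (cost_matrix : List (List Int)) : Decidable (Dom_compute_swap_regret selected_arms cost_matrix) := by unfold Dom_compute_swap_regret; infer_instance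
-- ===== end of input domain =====

-- B replaces A's group-times-then-rescan-per-target scheme by one forward pass that
-- accumulates, per seen arm, a per-target running-sum vector (and the algorithm total),
-- then takes the minimum of each vector; objective: alternative decomposition, same cost.

-- ===== PORT A =====
-- inner 'for target_arm in range(1, num_arms + 1)' loop body of A (state = (best_target, min_cost))
def csrPairStep (cost_matrix : List (List Int)) (ts : List Int)
    (st : Option Int × Option Int) (target : Int) : Option Int × Option Int :=
  let tot := ts.foldl (fun s t => s + PySem.List.pyGetD (PySem.List.pyGetD cost_matrix t []) (target - 1) 0) 0
  match st.2 with
  | none => (some target, some tot)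
  | some m => if tot < m then (some target, some tot) else st

def compute_swap_regret (selected_arms : List Int) (cost_matrix : List (List Int)) : Int :=
  let arm_times : PySem.Dict Int (List Int) :=
    (PySem.List.enumerate selected_arms 0).foldl
      (fun d p => d.modify p.2 [] (· ++ [p.1])) PySem.Dict.empty
  let num_arms : Int := ((PySem.List.pyGetD cost_matrix 0 []).length : Int)
  let best_swaps : PySem.Dict Int (Option Int × Option Int) :=
    arm_times.keys.foldl
      (fun bs arm =>
        bs.insert arm ((PySem.List.pyRange 1 (num_arms + 1) 1).foldl
          (csrPairStep cost_matrix (arm_times.getD arm [])) (none, none)))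
      PySem.Dict.empty
  let swapped_total_cost : Int := best_swaps.values.foldl (fun s p => s + p.2.getD 0) 0
  let algorithm_total : Int :=
    (PySem.List.enumerate selected_arms 0).foldl
      (fun s p => s + PySem.List.pyGetD (PySem.List.pyGetD cost_matrix p.1 []) (p.2 - 1) 0) 0
  algorithm_total - swapped_total_cost

-- ===== PORT B =====
-- 'for j in range(num_arms): vec[j] += row[j]'
def csrAddRow (num_arms : Nat) (v row : List Int) : List Int :=
  (List.range num_arms).foldl (fun v j => v.set j (v.getD j 0 + PySem.List.pyGetD row (j : Int) 0)) v

-- dict part of B's forward-pass loop body (acc.get / init with zeros / add the row)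
def csrDictStep (cost_matrix : List (List Int)) (num_arms : Nat)
    (d : PySem.Dict Int (List Int)) (p : Int × Int) : PySem.Dict Int (List Int) :=
  let acc := if d.contains p.2 then d else d.insert p.2 (List.replicate num_arms 0)
  acc.insert p.2 (csrAddRow num_arms (acc.getD p.2 []) (PySem.List.pyGetD cost_matrix p.1 []))

def compute_swap_regret_alt (selected_arms : List Int) (cost_matrix : List (List Int)) : Int :=
  let num_arms : Nat := (PySem.List.pyGetD cost_matrix 0 []).length
  let st : PySem.Dict Int (List Int) × Int :=
    (PySem.List.enumerate selected_arms 0).foldl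
      (fun st p =>
        (csrDictStep cost_matrix num_arms st.1 p,
         st.2 + PySem.List.pyGetD (PySem.List.pyGetD cost_matrix p.1 []) (p.2 - 1) 0))
      (PySem.Dict.empty, 0)
  let swapped_total : Int :=
    st.1.values.foldl (fun s vec => s + (PySem.List.min? vec (fun x => x)).getD 0) 0
  st.2 - swapped_total

-- ===== PRECONDITION & SPEC =====
-- Pre_ = exactly the inputs where Python A returns (an int): cost_matrix nonempty and, for each
-- step t, row t exists, is at least num_arms long, and accepts Python index arm-1.
def Pre_compute_swap_regret (selected_arms : List Int) (cost_matrix : List (List Int)) : Prop :=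
  cost_matrix ≠ [] ∧
  ∀ p ∈ PySem.List.enumerate selected_arms 0,
    PySem.Raise.InRange cost_matrix.length p.1 ∧
    (cost_matrix.getD 0 []).length ≤ (PySem.List.pyGetD cost_matrix p.1 []).length ∧
    PySem.Raise.InRange (PySem.List.pyGetD cost_matrix p.1 []).length (p.2 - 1)
instance (selected_arms : List Int) (cost_matrix : List (List Int)) : Decidable (Pre_compute_swap_regret selected_arms cost_matrix) := by unfold Pre_compute_swap_regret; infer_instance

def pvWitness_compute_swap_regret : List Int × List (List Int) :=
  ([1, 2, 1], [[3, 1], [2, 5], [4, 4]])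

def Spec_compute_swap_regret (selected_arms : List Int) (cost_matrix : List (List Int)) (out : Int) : Prop := out = compute_swap_regret_alt selected_arms cost_matrix
instance (selected_arms : List Int) (cost_matrix : List (List Int)) (out : Int) : Decidable (Spec_compute_swap_regret selected_arms cost_matrix out) := by unfold Spec_compute_swap_regret; infer_instance

-- ===== CLAIM (what is proved, stated in full; the proofs are below) =====
def Claim_equal_compute_swap_regret : Prop := ∀ (selected_arms : List Int) (cost_matrix : List (List Int)), Dom_compute_swap_regret selected_arms cost_matrix → Pre_compute_swap_regret selected_arms cost_matrix → Spec_compute_swap_regret selected_arms cost_matrix (compute_swap_regret selected_arms cost_matrix)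

-- ===== LEMMAS AND PROOFS =====

-- times at which arm a was selected (l = enumerate selected_arms)
def csrTimesOf (l : List (Int × Int)) (a : Int) : List Int :=
  (l.filter (fun p => p.2 == a)).map (·.1)

-- column sum over times ts at column j
def csrColSum (cost_matrix : List (List Int)) (ts : List Int) (j : Int) : Int :=
  (ts.map (fun t => PySem.List.pyGetD (PySem.List.pyGetD cost_matrix t []) j 0)).sum

-- B's per-arm accumulated vector
def csrVecOf (cost_matrix : List (List Int)) (n : Nat) (ts : List Int) : List Int :=
  ts.foldl (fun v t => csrAddRow n v (PySem.List.pyGetD cost_matrix t [])) (List.replicate n 0)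

theorem csrAddRow_eq_map (n : Nat) (v row : List Int) (h : n ≤ v.length) :
    csrAddRow n v row =
      ((List.range n).map (fun j => v.getD j 0 + PySem.List.pyGetD row (j : Int) 0)) ++ v.drop n := by
  induction n with
  | zero => simp [csrAddRow]
  | succ n ih =>
    have hn : n ≤ v.length := Nat.le_of_succ_le h
    have hset : csrAddRow (n + 1) v row
        = (csrAddRow n v row).set n ((csrAddRow n v row).getD n 0 + PySem.List.pyGetD row (n : Int) 0) := by
      simp [csrAddRow, List.range_succ, List.foldl_append]
    have hlenmap : ((List.range n).map (fun j => v.getD j 0 + PySem.List.pyGetD row (j : Int) 0)).length = n := by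
      simp
    have hdrop : v.drop n = v.getD n 0 :: v.drop (n + 1) := by
      have hlt : n < v.length := h
      rw [List.getD_eq_getElem _ _ hlt]
      exact (List.drop_eq_getElem_cons hlt)
    rw [hset, ih hn, hdrop]
    have hgetD : ((List.range n).map (fun j => v.getD j 0 + PySem.List.pyGetD row (j : Int) 0)
        ++ v.getD n 0 :: v.drop (n + 1)).getD n 0 = v.getD n 0 := by
      rw [List.getD_eq_getElem?_getD, List.getElem?_append_right hlenmap.le]
      simp
    rw [hgetD, List.set_append, if_neg (by omega)]
    simp [List.range_succ]

theorem csrVecOf_eq_map (cost_matrix : List (List Int)) (n : Nat) (ts : List Int) :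
    csrVecOf cost_matrix n ts =
      (List.range n).map (fun (j : Nat) => csrColSum cost_matrix ts ((j : Int))) := by
  induction ts using List.reverseRecOn with
  | nil =>
    simp [csrVecOf, csrColSum]
  | append_singleton ts t ih =>
    have h1 : csrVecOf cost_matrix n (ts ++ [t])
        = csrAddRow n (csrVecOf cost_matrix n ts) (PySem.List.pyGetD cost_matrix t []) := by
      rw [csrVecOf, csrVecOf, List.foldl_append, List.foldl_cons, List.foldl_nil]
    rw [h1, ih, csrAddRow_eq_map _ _ _ (by simp)]
    have hd : ((List.range n).map (fun (j : Nat) => csrColSum cost_matrix ts ((j : Int)))).drop n = [] :=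
      List.drop_eq_nil_of_le (by simp)
    rw [hd, List.append_nil]
    apply List.map_congr_left
    intro j hj
    rw [List.mem_range] at hj
    have : ((List.range n).map (fun (j : Nat) => csrColSum cost_matrix ts ((j : Int)))).getD j 0
        = csrColSum cost_matrix ts (j : Int) := by
      rw [List.getD_eq_getElem _ _ (by simpa using hj)]
      simp
    rw [this]
    simp [csrColSum]

-- A's grouping dict: lookup
theorem csrArmTimes_getD (sel : List Int) (a : Int) :
    ((PySem.List.enumerate sel 0).foldl (fun d p => d.modify p.2 [] (· ++ [p.1])) PySem.Dict.empty).getD a []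
      = csrTimesOf (PySem.List.enumerate sel 0) a := by
  have h := PySem.Dict.getD_foldl_modify_append
    (l := (PySem.List.enumerate sel 0).map Prod.swap) (d := (PySem.Dict.empty : PySem.Dict Int (List Int))) (c := a)
  rw [List.foldl_map] at h
  simpa [csrTimesOf, List.filter_map, Function.comp, List.map_map] using h

-- A's grouping dict: keys
theorem csrArmTimes_keys (sel : List Int) :
    ((PySem.List.enumerate sel 0).foldl (fun d p => d.modify p.2 [] (· ++ [p.1])) PySem.Dict.empty).keys
      = PySem.Set.ofList ((PySem.List.enumerate sel 0).map (·.2)) := by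
  have h := PySem.Dict.keys_foldl_modify_key
    (l := PySem.List.enumerate sel 0) (key := fun p => p.2)
    (d0 := ([] : List Int)) (f := fun _ p => (· ++ [p.1])) (d := (PySem.Dict.empty : PySem.Dict Int (List Int)))
  simpa using h

-- pair-min fold, started after the first update
theorem csrPairFold_snd_some (L : List Int) (f : Int → Int) (b : Option Int) (m : Int) :
    (L.foldl (fun st target =>
        match st.2 with
        | none => (some target, some (f target))
        | some mm => if f target < mm then (some target, some (f target)) else st)
      (b, some m)).2 = some ((L.map f).foldl min m) := by
  induction L generalizing b m with
  | nil => simp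
  | cons x L ih =>
    simp only [List.foldl_cons, List.map_cons]
    by_cases h : f x < m
    · rw [if_pos h, ih, min_eq_right (le_of_lt h)]
    · rw [if_neg h, ih, min_eq_left (not_lt.mp h)]

-- pair-min fold from (·, none) computes min? of the values
theorem csrPairFold_snd (L : List Int) (f : Int → Int) (b : Option Int) :
    (L.foldl (fun st target =>
        match st.2 with
        | none => (some target, some (f target))
        | some mm => if f target < mm then (some target, some (f target)) else st)
      (b, none)).2 = PySem.List.min? (L.map f) (fun x => x) := by
  cases L with
  | nil => simp [PySem.List.min?]
  | cons x L =>
    simp only [List.foldl_cons, List.map_cons]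
    rw [csrPairFold_snd_some, PySem.List.min?_id_cons]

-- per-arm: A's inner min loop = min of B's accumulated vector
theorem csrPerArm (cost_matrix : List (List Int)) (n : Nat) (ts : List Int) :
    (((PySem.List.pyRange 1 ((n : Int) + 1) 1).foldl (csrPairStep cost_matrix ts) (none, none)).2).getD 0
      = (PySem.List.min? (csrVecOf cost_matrix n ts) (fun x => x)).getD 0 := by
  have hstep : csrPairStep cost_matrix ts = (fun (st : Option Int × Option Int) (target : Int) =>
      match st.2 with
      | none => (some target, some (csrColSum cost_matrix ts (target - 1)))
      | some mm => if csrColSum cost_matrix ts (target - 1) < mm then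
          (some target, some (csrColSum cost_matrix ts (target - 1))) else st) := by
    funext st target
    have htot : ts.foldl (fun s t => s + PySem.List.pyGetD (PySem.List.pyGetD cost_matrix t []) (target - 1) 0) 0
        = csrColSum cost_matrix ts (target - 1) := by
      rw [PySem.List.foldl_add]; simp [csrColSum]
    simp only [csrPairStep, htot]
  rw [hstep, csrPairFold_snd (PySem.List.pyRange 1 ((n : Int) + 1) 1)
      (fun target => csrColSum cost_matrix ts (target - 1)) none]
  have hlist : (PySem.List.pyRange 1 ((n : Int) + 1) 1).map (fun target => csrColSum cost_matrix ts (target - 1))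
      = csrVecOf cost_matrix n ts := by
    rw [csrVecOf_eq_map, PySem.List.pyRange_one, List.map_map]
    have hn : (((n : Int) + 1) - 1).toNat = n := by omega
    rw [hn]
    apply List.map_congr_left
    intro k _
    simp [Function.comp]
  rw [hlist]

theorem csrTimesOf_snoc (seen : List (Int × Int)) (p : Int × Int) (a : Int) :
    csrTimesOf (seen ++ [p]) a = csrTimesOf seen a ++ (if p.2 = a then [p.1] else []) := by
  simp only [csrTimesOf, List.filter_append, List.map_append]
  by_cases h : p.2 = a <;> simp [h]

theorem csrTimesOf_nil_of_not_mem (seen : List (Int × Int)) (a : Int)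
    (h : a ∉ seen.map (·.2)) : csrTimesOf seen a = [] := by
  simp only [csrTimesOf, List.map_eq_nil_iff, List.filter_eq_nil_iff]
  intro p hp hpa
  exact h (List.mem_map.mpr ⟨p, hp, by simpa using hpa⟩)

theorem csrVecOf_snoc (cost_matrix : List (List Int)) (n : Nat) (ts : List Int) (t : Int) :
    csrVecOf cost_matrix n (ts ++ [t])
      = csrAddRow n (csrVecOf cost_matrix n ts) (PySem.List.pyGetD cost_matrix t []) := by
  rw [csrVecOf, csrVecOf, List.foldl_append, List.foldl_cons, List.foldl_nil]

-- one step of B's dict fold preserves the invariant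
theorem csrDictStep_inv (cost_matrix : List (List Int)) (n : Nat)
    (d : PySem.Dict Int (List Int)) (seen : List (Int × Int)) (p : Int × Int)
    (hk : d.keys = PySem.Set.ofList (seen.map (·.2)))
    (hg : ∀ a, d.getD a [] = if a ∈ seen.map (·.2) then csrVecOf cost_matrix n (csrTimesOf seen a) else []) :
    (csrDictStep cost_matrix n d p).keys = PySem.Set.ofList ((seen ++ [p]).map (·.2)) ∧
    (∀ a, (csrDictStep cost_matrix n d p).getD a []
       = if a ∈ (seen ++ [p]).map (·.2) then csrVecOf cost_matrix n (csrTimesOf (seen ++ [p]) a) else []) := by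
  by_cases hmem : p.2 ∈ seen.map (·.2)
  · have hc : d.contains p.2 = true :=
      (PySem.Dict.contains_iff_mem_keys d p.2).mpr (by rw [hk]; simpa [PySem.Set.mem_ofList] using hmem)
    have hstep : csrDictStep cost_matrix n d p
        = d.insert p.2 (csrAddRow n (d.getD p.2 []) (PySem.List.pyGetD cost_matrix p.1 [])) := by
      simp [csrDictStep, hc]
    constructor
    · have hmap : (seen ++ [p]).map (·.2) = seen.map (·.2) ++ [p.2] := by simp
      rw [hstep, PySem.Dict.keys_insert_of_contains _ _ hc, hk, hmap,
        PySem.Set.ofList_append_singleton,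
        PySem.Set.add_of_mem (by simpa [PySem.Set.mem_ofList] using hmem)]
    · intro a
      rw [hstep, PySem.Dict.getD_insert]
      by_cases ha : a = p.2
      · rw [if_pos ha, ha, hg p.2, if_pos hmem, if_pos (by simp), csrTimesOf_snoc, if_pos rfl,
          csrVecOf_snoc]
      · have hts : csrTimesOf (seen ++ [p]) a = csrTimesOf seen a := by
          rw [csrTimesOf_snoc, if_neg (fun h => ha h.symm), List.append_nil]
        have hmm : (a ∈ (seen ++ [p]).map (·.2)) ↔ a ∈ seen.map (·.2) := by
          simp only [List.map_append, List.mem_append, List.map_cons, List.map_nil,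
            List.mem_singleton, ha, or_false]
        rw [if_neg ha, hg a, hts]
        by_cases h2 : a ∈ seen.map (·.2)
        · rw [if_pos h2, if_pos (hmm.mpr h2)]
        · rw [if_neg h2, if_neg (fun h => h2 (hmm.mp h))]
  · have hc : d.contains p.2 = false := by
      cases h : d.contains p.2
      · rfl
      · exact absurd (by
          have := (PySem.Dict.contains_iff_mem_keys d p.2).mp h
          rw [hk] at this
          simpa [PySem.Set.mem_ofList] using this) hmem
    have hstep : csrDictStep cost_matrix n d p
        = d.insert p.2 (csrAddRow n (List.replicate n 0) (PySem.List.pyGetD cost_matrix p.1 [])) := by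
      simp only [csrDictStep, hc, Bool.false_eq_true, if_false]
      rw [PySem.Dict.getD_insert_self, PySem.Dict.insert_insert_self]
    constructor
    · have hmap : (seen ++ [p]).map (·.2) = seen.map (·.2) ++ [p.2] := by simp
      rw [hstep, PySem.Dict.keys_insert_of_not_contains _ _ hc, hk, hmap,
        PySem.Set.ofList_append_singleton,
        PySem.Set.add_of_not_mem (fun h => hmem (by simpa [PySem.Set.mem_ofList] using h))]
    · intro a
      rw [hstep, PySem.Dict.getD_insert]
      by_cases ha : a = p.2
      · rw [if_pos ha, ha, if_pos (by simp), csrTimesOf_snoc, if_pos rfl,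
          csrTimesOf_nil_of_not_mem _ _ hmem, List.nil_append]
        rfl
      · have hts : csrTimesOf (seen ++ [p]) a = csrTimesOf seen a := by
          rw [csrTimesOf_snoc, if_neg (fun h => ha h.symm), List.append_nil]
        have hmm : (a ∈ (seen ++ [p]).map (·.2)) ↔ a ∈ seen.map (·.2) := by
          simp only [List.map_append, List.mem_append, List.map_cons, List.map_nil,
            List.mem_singleton, ha, or_false]
        rw [if_neg ha, hg a, hts]
        by_cases h2 : a ∈ seen.map (·.2)
        · rw [if_pos h2, if_pos (hmm.mpr h2)]
        · rw [if_neg h2, if_neg (fun h => h2 (hmm.mp h))]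

-- B's dict fold invariant
theorem csrDictFold_inv (cost_matrix : List (List Int)) (n : Nat) :
    ∀ (l : List (Int × Int)) (d : PySem.Dict Int (List Int)) (seen : List (Int × Int)),
      d.keys = PySem.Set.ofList (seen.map (·.2)) →
      (∀ a, d.getD a [] = if a ∈ seen.map (·.2) then csrVecOf cost_matrix n (csrTimesOf seen a) else []) →
      (l.foldl (csrDictStep cost_matrix n) d).keys = PySem.Set.ofList ((seen ++ l).map (·.2)) ∧
      (∀ a, (l.foldl (csrDictStep cost_matrix n) d).getD a []
         = if a ∈ (seen ++ l).map (·.2) then csrVecOf cost_matrix n (csrTimesOf (seen ++ l) a) else []) := by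
  intro l
  induction l with
  | nil =>
    intro d seen hk hg
    simp only [List.foldl_nil, List.append_nil]
    exact ⟨hk, hg⟩
  | cons p l ih =>
    intro d seen hk hg
    obtain ⟨hk', hg'⟩ := csrDictStep_inv cost_matrix n d seen p hk hg
    have hres := ih (csrDictStep cost_matrix n d p) (seen ++ [p]) hk' hg'
    simp only [List.foldl_cons]
    rw [show seen ++ p :: l = (seen ++ [p]) ++ l by simp]
    exact hres

-- ===== VERDICT (by name: the statement is the Claim_ definition above) =====
theorem compute_swap_regret_spec : Claim_equal_compute_swap_regret := by
  intro sel cm _dom _pre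
  unfold Spec_compute_swap_regret
  simp only [compute_swap_regret, compute_swap_regret_alt]
  rw [PySem.List.foldl_prod_mk
    (f := fun d p => csrDictStep cm (PySem.List.pyGetD cm 0 []).length d p)
    (g := fun s (p : Int × Int) => s + PySem.List.pyGetD (PySem.List.pyGetD cm p.1 []) (p.2 - 1) 0)]
  congr 1
  -- remaining: A's swapped total = B's swapped total
  have hnodupK : (PySem.Set.ofList ((PySem.List.enumerate sel 0).map (·.2))).Nodup :=
    PySem.Set.nodup_ofList _
  -- A's best_swaps dict: items are keys paired with the inner-loop results
  have hfresh : ∀ a ∈ ((PySem.List.enumerate sel 0).foldl (fun d p => d.modify p.2 [] (· ++ [p.1])) PySem.Dict.empty).keys,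
      (PySem.Dict.empty : PySem.Dict Int (Option Int × Option Int)).contains a = false := by
    intro a _; simp [PySem.Dict.contains_empty]
  have hAnodup : (List.map (fun a => a) ((PySem.List.enumerate sel 0).foldl (fun d p => d.modify p.2 [] (· ++ [p.1])) PySem.Dict.empty).keys).Nodup := by
    rw [List.map_id', csrArmTimes_keys]; exact hnodupK
  have hAitems := PySem.Dict.items_foldl_insert_fresh
    (l := ((PySem.List.enumerate sel 0).foldl (fun d p => d.modify p.2 [] (· ++ [p.1])) PySem.Dict.empty).keys)
    (k := fun a => a)
    (v := fun arm => (PySem.List.pyRange 1 (((PySem.List.pyGetD cm 0 []).length : Int) + 1) 1).foldl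
        (csrPairStep cm (((PySem.List.enumerate sel 0).foldl (fun d p => d.modify p.2 [] (· ++ [p.1])) PySem.Dict.empty).getD arm [])) (none, none))
    (d := PySem.Dict.empty) hfresh hAnodup
  -- B's accumulated dict
  obtain ⟨hDk, hDg⟩ := csrDictFold_inv cm ((PySem.List.pyGetD cm 0 []).length)
    (PySem.List.enumerate sel 0) PySem.Dict.empty []
    (by simp [PySem.Dict.keys_empty]) (by intro a; simp [PySem.Dict.getD_empty])
  simp only [List.nil_append] at hDk hDg
  have hDval := PySem.Dict.values_eq_map_keys
    ((PySem.List.enumerate sel 0).foldl (csrDictStep cm ((PySem.List.pyGetD cm 0 []).length)) PySem.Dict.empty)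
    (by rw [hDk]; exact hnodupK) ([] : List Int)
  rw [PySem.List.foldl_add, PySem.List.foldl_add]
  congr 1
  -- values of both dicts as maps over the same key list
  have hAval : ((((PySem.List.enumerate sel 0).foldl (fun d p => d.modify p.2 [] (· ++ [p.1])) PySem.Dict.empty).keys.foldl
      (fun bs arm => bs.insert arm ((PySem.List.pyRange 1 (((PySem.List.pyGetD cm 0 []).length : Int) + 1) 1).foldl
        (csrPairStep cm (((PySem.List.enumerate sel 0).foldl (fun d p => d.modify p.2 [] (· ++ [p.1])) PySem.Dict.empty).getD arm [])) (none, none)))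
      PySem.Dict.empty)).values
      = ((PySem.List.enumerate sel 0).foldl (fun d p => d.modify p.2 [] (· ++ [p.1])) PySem.Dict.empty).keys.map
          (fun arm => (PySem.List.pyRange 1 (((PySem.List.pyGetD cm 0 []).length : Int) + 1) 1).foldl
            (csrPairStep cm (((PySem.List.enumerate sel 0).foldl (fun d p => d.modify p.2 [] (· ++ [p.1])) PySem.Dict.empty).getD arm [])) (none, none)) := by
    simp only [PySem.Dict.values, hAitems]
    simp [PySem.Dict.empty, Function.comp]
  rw [hAval, hDval, hDk, csrArmTimes_keys, List.map_map, List.map_map]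
  refine congrArg List.sum (List.map_congr_left ?_)
  intro a ha
  have hamem : a ∈ (PySem.List.enumerate sel 0).map (·.2) := by
    simpa [PySem.Set.mem_ofList] using ha
  simp only [Function.comp]
  rw [csrArmTimes_getD, csrPerArm, hDg a, if_pos hamem]
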